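-- pv_equiv track=rewrite | github.com/feverittm/python-stuff | with_previous.py | with_previous_1
-- ===== SOURCE A (Python) =====
-- def with_previous_1(n):
--     """
--     >>> with_previous("hello")
--     [('h', None), ('e', 'h'), ('l', 'e'), ('l', 'l'), ('o', 'l')]
--     >>> with_previous([1, 2, 3])
--     [(1, None), (2, 1), (3, 2)]
--     """
--
--     prev = None
--     lst = []
--     for x in range(0, len(n)):
--         if x != 0:
--             prev = n[x-1]
--         lst.append(tuple((n[x], prev)))
--
--     return lst
-- ===== SOURCE B (Python) =====
-- def with_previous_1(n):
--     items = list(n)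
--     out = []
--     while items:
--         last = items.pop()
--         out.append((last, items[-1] if items else None))
--     out.reverse()
--     return out
-- ===== Notes on version B (the rewrite author's own statement) =====
-- stated objective: alternative
-- what changed: Replaced the forward index loop with a rolling prev variable and x!=0 guard by a backward stack consumption: pop elements off the end, pair each with the new stack top (the predecessor), and reverse the collected pairs at the end.
import Mathlib
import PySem

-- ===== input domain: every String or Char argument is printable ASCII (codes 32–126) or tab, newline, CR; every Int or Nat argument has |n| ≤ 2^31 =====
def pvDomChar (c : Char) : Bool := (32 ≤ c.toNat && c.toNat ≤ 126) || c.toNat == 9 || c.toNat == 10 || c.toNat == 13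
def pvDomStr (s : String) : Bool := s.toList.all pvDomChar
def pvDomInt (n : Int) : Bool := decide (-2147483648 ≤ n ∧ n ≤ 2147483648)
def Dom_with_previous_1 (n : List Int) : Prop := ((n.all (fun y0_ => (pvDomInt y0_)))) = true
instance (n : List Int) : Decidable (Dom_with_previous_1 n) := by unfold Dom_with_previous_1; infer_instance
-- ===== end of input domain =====

-- B (alternative): replaces A's forward index loop with rolling prev and x != 0 guard by a backward stack consumption (pop from the end, pair with the new top, reverse at the end); same value on every input.


-- ===== PORT A =====
-- literal port of A: loop over range(len(n)) carrying (prev, lst)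
def with_previous_1 (n : List Int) : List (Int × Option Int) :=
  let res := (PySem.List.pyRange 0 n.length 1).foldl
    (fun (st : Option Int × List (Int × Option Int)) x =>
      let prev := if x ≠ 0 then some (PySem.List.pyGetD n (x - 1) 0) else st.1
      (prev, st.2 ++ [(PySem.List.pyGetD n x 0, prev)]))
    (none, [])
  res.2

-- ===== PORT B =====
-- port of B's while loop: pop items' last element, pair it with the new top (items[-1] if items else None), accumulate in out
def wpLoop (items : List Int) (out : List (Int × Option Int)) : List (Int × Option Int) :=
  if h : items = [] then out
  else
    let last := items.getLast h
    let rest := items.dropLast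
    wpLoop rest (out ++ [(last, rest.getLast?)])
termination_by items.length
decreasing_by
  have := List.length_pos_iff.mpr h
  simp [List.length_dropLast]; omega

def with_previous_1_alt (n : List Int) : List (Int × Option Int) :=
  (wpLoop n []).reverse

-- ===== PRECONDITION & SPEC =====
def Spec_with_previous_1 (n : List Int) (out : List (Int × Option Int)) : Prop := out = with_previous_1_alt n
instance (n : List Int) (out : List (Int × Option Int)) : Decidable (Spec_with_previous_1 n out) := by unfold Spec_with_previous_1; infer_instance

-- ===== CLAIM (what is proved, stated in full; the proofs are below) =====
def Claim_equal_with_previous_1 : Prop := ∀ (n : List Int), Dom_with_previous_1 n → Spec_with_previous_1 n (with_previous_1 n)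

-- ===== LEMMAS AND PROOFS =====
def shiftedOf (n : List Int) : List (Option Int) := none :: n.dropLast.map some

lemma shifted_getD (n : List Int) (m : Nat) (h1 : 1 ≤ m) (h2 : m < n.length) :
    (shiftedOf n).getD m none = some (n.getD (m - 1) 0) := by
  unfold shiftedOf
  obtain ⟨k, rfl⟩ : ∃ k, m = k + 1 := ⟨m - 1, by omega⟩
  have hk : k < n.dropLast.length := by simp [List.length_dropLast]; omega
  simp only [List.getD, Nat.add_sub_cancel, List.getElem?_cons_succ, List.getElem?_map]
  rw [List.getElem?_eq_getElem hk, List.getElem?_eq_getElem (by omega : k < n.length)]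
  simp [List.getElem_dropLast]

lemma zip_getElem (n : List Int) (m : Nat) (h : m < n.length) :
    (n.zip (shiftedOf n))[m]?
      = some (n.getD m 0, (shiftedOf n).getD m none) := by
  have h2 : m < (shiftedOf n).length := by simp [shiftedOf, List.length_dropLast]; omega
  have hz : m < (n.zip (shiftedOf n)).length := by
    simp [List.length_zip, shiftedOf, List.length_dropLast]; omega
  rw [List.getElem?_eq_getElem hz]
  simp [List.getElem_zip, List.getD_eq_getElem?_getD, List.getElem?_eq_getElem h,
    List.getElem?_eq_getElem h2]

lemma loop_inv (n : List Int) (m : Nat) (hm : m ≤ n.length) :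
    (List.map (fun k : Nat => (k : Int)) (List.range m)).foldl
      (fun (st : Option Int × List (Int × Option Int)) x =>
        ((if x ≠ 0 then some (PySem.List.pyGetD n (x - 1) 0) else st.1),
         st.2 ++ [(PySem.List.pyGetD n x 0,
           (if x ≠ 0 then some (PySem.List.pyGetD n (x - 1) 0) else st.1))]))
      (none, [])
    = ((if m = 0 then none else (shiftedOf n).getD (m - 1) none),
       (n.zip (shiftedOf n)).take m) := by
  induction m with
  | zero => simp
  | succ k ih =>
    rw [List.range_succ, List.map_append, List.foldl_append, ih (by omega)]
    simp only [List.map_cons, List.map_nil, List.foldl_cons, List.foldl_nil]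
    have hprev : (if (k : Int) ≠ 0 then some (PySem.List.pyGetD n ((k : Int) - 1) 0)
        else (if k = 0 then none else (shiftedOf n).getD (k - 1) none))
        = (shiftedOf n).getD k none := by
      by_cases h0 : k = 0
      · subst h0; simp [shiftedOf]
      · have h1 : ((k : Int) - 1) = ((k - 1 : Nat) : Int) := by omega
        rw [if_pos (by exact_mod_cast h0), h1, PySem.List.pyGetD_natCast,
          shifted_getD n k (by omega) (by omega)]
    rw [hprev]
    refine Prod.ext rfl ?_
    simp only
    rw [List.take_add_one, zip_getElem n k (by omega), PySem.List.pyGetD_natCast]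
    rfl

lemma zip_snoc (xs : List Int) (y : Int) (p : Option Int) :
    (xs ++ [y]).zip (p :: xs.map some)
      = xs.zip (p :: xs.dropLast.map some) ++ [(y, xs.getLast?.or p)] := by
  induction xs generalizing p with
  | nil => simp
  | cons x xs' ih =>
    show (x, p) :: (xs' ++ [y]).zip (some x :: xs'.map some) = _
    rw [ih]
    cases xs' with
    | nil => simp
    | cons z zs =>
      obtain ⟨a, ha⟩ : ∃ a, (z :: zs).getLast? = some a :=
        Option.isSome_iff_exists.mp (List.getLast?_isSome.mpr (by simp))
      simp [List.getLast?_cons_cons, ha]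

lemma wpLoop_eq (items : List Int) : ∀ out,
    wpLoop items out = out ++ (items.zip (shiftedOf items)).reverse := by
  induction items using List.reverseRecOn with
  | nil => intro out; simp [wpLoop]
  | append_singleton xs y ih =>
    intro out
    rw [wpLoop]
    simp only [dif_neg (by simp : xs ++ [y] ≠ [])]
    rw [List.getLast_append_singleton, List.dropLast_concat, ih]
    have hz : (xs ++ [y]).zip (shiftedOf (xs ++ [y]))
        = xs.zip (shiftedOf xs) ++ [(y, xs.getLast?)] := by
      unfold shiftedOf
      rw [List.dropLast_concat, zip_snoc]
      simp
    rw [hz]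
    simp

-- ===== VERDICT (by name: the statement is the Claim_ definition above) =====
theorem with_previous_1_spec : Claim_equal_with_previous_1 := by
  intro n _
  unfold Spec_with_previous_1 with_previous_1 with_previous_1_alt
  rw [wpLoop_eq, List.nil_append, List.reverse_reverse]
  have hr : PySem.List.pyRange 0 (n.length : Int) 1
      = List.map (fun k : Nat => (k : Int)) (List.range n.length) := by
    simp [PySem.List.pyRange_one]
  simp only [hr, loop_inv n n.length le_rfl]
  rw [List.take_of_length_le (by simp [List.length_zip, shiftedOf, List.length_dropLast])]
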